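-- pv_equiv track=rewrite | github.com/ssweber/clicknick | src/clicknick/ladder/codec.py | _canonicalize_operand_for_encoding
-- ===== SOURCE A (Python) =====
-- def _canonicalize_operand_for_encoding(operand: str) -> str:
--     """Canonicalize operand representation to match Click native stream forms.
--
--     Click encodes X/Y addresses as 3-digit decimals (e.g. X1 -> X001).
--     Other banks are kept as-is.
--     """
--     idx = 0
--     while idx < len(operand) and operand[idx].isalpha():
--         idx += 1
--     if idx == 0 or idx == len(operand):
--         return operand
--     prefix = operand[:idx]
--     digits = operand[idx:]
--     if prefix in {"X", "Y"} and digits.isdigit():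
--         return f"{prefix}{int(digits):03d}"
--     return operand
-- ===== SOURCE B (Python) =====
-- def _canonicalize_operand_for_encoding(operand: str) -> str:
--     """Canonicalize X/Y operand to 3-digit decimal form (slice-based, no scan loop)."""
--     prefix, tail = operand[:1], operand[1:]
--     if prefix in {"X", "Y"} and tail.isdigit():
--         return f"{prefix}{int(tail):03d}"
--     return operand
-- ===== Notes on version B (the rewrite author's own statement) =====
-- stated objective: simpler
-- what changed: Drops the index-scanning while loop over the alphabetic prefix: a valid match can only have a single-letter prefix, so B just slices operand[:1]/operand[1:] and tests prefix membership and tail.isdigit() directly.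
import Mathlib
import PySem

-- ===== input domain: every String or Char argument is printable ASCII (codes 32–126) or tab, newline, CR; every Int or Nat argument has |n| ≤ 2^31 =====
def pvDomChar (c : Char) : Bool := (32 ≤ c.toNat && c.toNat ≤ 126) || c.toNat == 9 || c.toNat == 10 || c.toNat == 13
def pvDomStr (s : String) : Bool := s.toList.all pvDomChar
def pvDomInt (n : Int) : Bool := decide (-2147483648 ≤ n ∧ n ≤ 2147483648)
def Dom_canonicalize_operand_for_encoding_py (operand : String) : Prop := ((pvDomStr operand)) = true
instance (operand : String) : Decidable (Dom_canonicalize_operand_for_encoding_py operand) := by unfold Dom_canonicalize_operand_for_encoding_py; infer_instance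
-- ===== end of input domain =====

-- ===== PORT A =====
-- B replaces A's alphabetic-prefix scan by a direct one-character slice test; same return value on the domain.

-- while idx < len(operand) and operand[idx].isalpha(): idx += 1   (count of leading alphabetic chars)
def pvAlphaScan : List Char → Nat
  | [] => 0
  | c :: rest => if PySem.Chars.isalpha c then pvAlphaScan rest + 1 else 0

-- the shared tail of both Pythons: if prefix in {"X","Y"} and digits.isdigit(): return f"{prefix}{int(digits):03d}"; return operand
def pvFinish (operand : String) (pfx digits : List Char) : String :=
  if (pfx = ['X'] ∨ pfx = ['Y']) ∧ PySem.Chars.strIsdigit digits then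
    match PySem.Int.ofChars? digits with
    | some n => String.ofList (pfx ++ PySem.Chars.zfill (PySem.Int.toChars n) 3)  -- :03d on n ≥ 0
    | none => operand   -- unreachable: isdigit() on the ASCII domain guarantees int() succeeds
  else operand

def canonicalize_operand_for_encoding_py (operand : String) : String :=
  if pvAlphaScan operand.toList = 0 ∨ pvAlphaScan operand.toList = operand.toList.length then
    operand
  else
    pvFinish operand
      (PySem.List.slice operand.toList none (some (pvAlphaScan operand.toList : Int)))  -- operand[:idx]
      (PySem.List.slice operand.toList (some (pvAlphaScan operand.toList : Int)) none)  -- operand[idx:]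

-- ===== PORT B =====
def canonicalize_operand_for_encoding_py_alt (operand : String) : String :=
  pvFinish operand
    (PySem.List.slice operand.toList none (some (1 : Int)))   -- operand[:1]
    (PySem.List.slice operand.toList (some (1 : Int)) none)   -- operand[1:]

-- ===== PRECONDITION & SPEC =====
def Spec_canonicalize_operand_for_encoding_py (operand : String) (out : String) : Prop := out = canonicalize_operand_for_encoding_py_alt operand
instance (operand : String) (out : String) : Decidable (Spec_canonicalize_operand_for_encoding_py operand out) := by unfold Spec_canonicalize_operand_for_encoding_py; infer_instance

-- ===== CLAIM (what is proved, stated in full; the proofs are below) =====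
def Claim_equal_canonicalize_operand_for_encoding_py : Prop := ∀ (operand : String), Dom_canonicalize_operand_for_encoding_py operand → Spec_canonicalize_operand_for_encoding_py operand (canonicalize_operand_for_encoding_py operand)

-- ===== LEMMAS AND PROOFS =====

lemma pvAlphaScan_le (s : List Char) : pvAlphaScan s ≤ s.length := by
  induction s with
  | nil => simp [pvAlphaScan]
  | cons c rest ih =>
    simp only [pvAlphaScan, List.length_cons]
    split
    · omega
    · omega

lemma pv_alpha_not_digit (c : Char) (h : PySem.Chars.isalpha c = true) :
    PySem.Chars.isdigit c = false := by
  have hA : ('A').val.toNat = 65 := by decide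
  have hZ : ('Z').val.toNat = 90 := by decide
  have ha : ('a').val.toNat = 97 := by decide
  have hz : ('z').val.toNat = 122 := by decide
  have h0 : ('0').val.toNat = 48 := by decide
  have h9 : ('9').val.toNat = 57 := by decide
  simp only [PySem.Chars.isalpha, PySem.Chars.isupper, PySem.Chars.islower,
    PySem.Chars.isdigit, Bool.or_eq_true, Bool.and_eq_true, decide_eq_true_eq,
    Bool.and_eq_false_iff, decide_eq_false_iff_not, Char.le_def,
    UInt32.le_iff_toNat_le, hA, hZ, ha, hz, h0, h9] at *
  omega

lemma pv_slice_take_one (s : List Char) :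
    PySem.List.slice s none (some (1 : Int)) = s.take 1 := by
  have := PySem.List.slice_to_natCast s 1
  simpa using this

lemma pv_slice_drop_one (s : List Char) :
    PySem.List.slice s (some (1 : Int)) none = s.drop 1 := by
  have := PySem.List.slice_from_natCast s 1
  simpa using this

lemma pv_main (operand : String) (s : List Char) :
    (if pvAlphaScan s = 0 ∨ pvAlphaScan s = s.length then operand
     else pvFinish operand
        (PySem.List.slice s none (some (pvAlphaScan s : Int)))
        (PySem.List.slice s (some (pvAlphaScan s : Int)) none))
    = pvFinish operand
        (PySem.List.slice s none (some (1 : Int)))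
        (PySem.List.slice s (some (1 : Int)) none) := by
  rw [pv_slice_take_one, pv_slice_drop_one]
  cases s with
  | nil => simp [pvAlphaScan, pvFinish, PySem.Chars.strIsdigit]
  | cons c rest =>
    by_cases hc : PySem.Chars.isalpha c = true
    · cases rest with
      | nil =>
        -- idx = 1 = len → A returns operand; B's tail is empty so isdigit is false
        simp [pvAlphaScan, hc, pvFinish, PySem.Chars.strIsdigit]
      | cons d rs =>
        by_cases hd : PySem.Chars.isalpha d = true
        · -- idx ≥ 2: A's prefix is never one letter; B's tail starts with a letter
          have hB : pvFinish operand ((c :: d :: rs).take 1) ((c :: d :: rs).drop 1)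
              = operand := by
            simp [pvFinish, PySem.Chars.strIsdigit, pv_alpha_not_digit d hd]
          rw [hB]
          have hn : pvAlphaScan (c :: d :: rs) = pvAlphaScan rs + 2 := by
            simp [pvAlphaScan, hc, hd]
          by_cases hlen : pvAlphaScan (c :: d :: rs) = (c :: d :: rs).length
          · simp [hlen]
          · have hle := pvAlphaScan_le (c :: d :: rs)
            rw [if_neg (by omega : ¬ (pvAlphaScan (c :: d :: rs) = 0 ∨
                pvAlphaScan (c :: d :: rs) = (c :: d :: rs).length))]
            rw [PySem.List.slice_to_natCast]
            have hlt : pvAlphaScan (c :: d :: rs) < (c :: d :: rs).length := by omega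
            have htl : ((c :: d :: rs).take (pvAlphaScan (c :: d :: rs))).length
                = pvAlphaScan (c :: d :: rs) := by
              simp only [List.length_take]; omega
            apply if_neg
            rintro ⟨h1 | h1, -⟩ <;> rw [h1] at htl <;> simp at htl <;> omega
        · -- idx = 1: A's prefix is operand[:1], digits is operand[1:] — same as B
          have hn : pvAlphaScan (c :: d :: rs) = 1 := by
            simp [pvAlphaScan, hc, hd]
          rw [hn]
          rw [if_neg (by simp : ¬ ((1 : Nat) = 0 ∨ (1 : Nat) = (c :: d :: rs).length))]
          rw [show ((1 : Nat) : Int) = (1 : Int) by norm_num,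
            pv_slice_take_one, pv_slice_drop_one]
    · -- first char not alphabetic: idx = 0 → A returns operand; that char is not X/Y → B too
      have hx : c ≠ 'X' := fun h => hc (by rw [h]; decide)
      have hy : c ≠ 'Y' := fun h => hc (by rw [h]; decide)
      have hc' : PySem.Chars.isalpha c = false := by simpa using hc
      simp [pvAlphaScan, hc', pvFinish, hx, hy]

-- ===== VERDICT (by name: the statement is the Claim_ definition above) =====
theorem canonicalize_operand_for_encoding_py_spec : Claim_equal_canonicalize_operand_for_encoding_py := by
  intro operand _
  show canonicalize_operand_for_encoding_py operand
      = canonicalize_operand_for_encoding_py_alt operand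
  unfold canonicalize_operand_for_encoding_py canonicalize_operand_for_encoding_py_alt
  exact pv_main operand operand.toList
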